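-- pv_equiv track=rewrite | github.com/ElchaabiMohamed/InferCode_SVM | NC-5690-python-files/program_2787.py | indiceOccurrence
-- ===== SOURCE A (Python) =====
-- def indiceOccurrence(n,x,l):
--   i=0
--   j=0
--   res = -1
--   while j <3 and i < len(l):
--     if l[i] == x:
--       j+=1
--       if j == 3:
--         res = l[i+1]
--     i+=1
--   return(res)
-- ===== SOURCE B (Python) =====
-- def indiceOccurrence(n, x, l):
--     positions = [i for i, v in enumerate(l) if v == x]
--     return l[positions[2] + 1] if len(positions) >= 3 else -1
-- ===== Notes on version B (the rewrite author's own statement) =====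
-- stated objective: simpler
-- what changed: Replaces the fused while-loop with counter, early exit and mutable result by building the index table of all occurrences of x in one list comprehension and then a single positional access (l[positions[2]+1] if there are at least 3 occurrences, else -1).
import Mathlib
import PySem

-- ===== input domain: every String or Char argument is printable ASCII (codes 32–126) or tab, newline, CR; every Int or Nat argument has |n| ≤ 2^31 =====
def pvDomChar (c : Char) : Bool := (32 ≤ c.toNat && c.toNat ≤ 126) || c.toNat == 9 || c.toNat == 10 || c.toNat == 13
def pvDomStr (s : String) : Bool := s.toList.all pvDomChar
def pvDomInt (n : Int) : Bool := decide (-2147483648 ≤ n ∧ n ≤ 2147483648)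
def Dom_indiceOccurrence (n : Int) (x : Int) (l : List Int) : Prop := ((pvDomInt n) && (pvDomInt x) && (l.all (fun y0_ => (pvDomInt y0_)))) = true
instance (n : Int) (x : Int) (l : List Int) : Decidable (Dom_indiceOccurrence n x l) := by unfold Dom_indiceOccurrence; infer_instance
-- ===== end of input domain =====

-- B replaces A's fused counting loop by an occurrence-index table plus one positional access (objective: simpler).
-- Pre_ excludes exactly the inputs where both Pythons raise IndexError (3rd occurrence of x is the last element).

-- ===== PORT A =====
-- while loop over index i with occurrence counter j and result accumulator res;
-- the suffix list argument drives the recursion, i tracks the Python index.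
-- l[i+1] is ported as pyGet? with a .getD 0 default: inside Pre_ the access is in range
-- (out of range Python raises IndexError; those inputs are excluded by Pre_).
def pvLoopA (x : Int) (l : List Int) : List Int → Int → Nat → Int → Int
  | [], _, _, res => res
  | a :: t, i, j, res =>
    if j < 3 then
      if a = x then
        let j' := j + 1
        let res' := if j' = 3 then (PySem.List.pyGet? l (i + 1)).getD 0 else res
        pvLoopA x l t (i + 1) j' res'
      else pvLoopA x l t (i + 1) j res
    else res

def indiceOccurrence (n : Int) (x : Int) (l : List Int) : Int :=
  pvLoopA x l l 0 0 (-1)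

-- ===== PORT B =====
-- positions = [i for i, v in enumerate(l) if v == x]; then one positional access.
def indiceOccurrence_alt (n : Int) (x : Int) (l : List Int) : Int :=
  let positions := ((PySem.List.enumerate l).filter (fun p => p.2 == x)).map Prod.fst
  if 3 ≤ positions.length then
    (PySem.List.pyGet? l ((PySem.List.pyGet? positions 2).getD 0 + 1)).getD 0
  else -1

-- ===== PRECONDITION & SPEC =====
-- Pre_ excludes exactly the inputs on which Python A raises IndexError (and B raises there too):
-- those where the third occurrence of x is the last element of l, i.e. l ends in x with exactly
-- two earlier occurrences of x.
def Pre_indiceOccurrence (n : Int) (x : Int) (l : List Int) : Prop :=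
  ¬ (l.getLast? = some x ∧ l.dropLast.count x = 2)
instance (n : Int) (x : Int) (l : List Int) : Decidable (Pre_indiceOccurrence n x l) := by
  unfold Pre_indiceOccurrence; infer_instance
def pvWitness_indiceOccurrence : Int × Int × List Int := (0, 1, [1, 1, 1, 5, 0])
def Spec_indiceOccurrence (n : Int) (x : Int) (l : List Int) (out : Int) : Prop := out = indiceOccurrence_alt n x l
instance (n : Int) (x : Int) (l : List Int) (out : Int) : Decidable (Spec_indiceOccurrence n x l out) := by unfold Spec_indiceOccurrence; infer_instance

-- ===== CLAIM (what is proved, stated in full; the proofs are below) =====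
def Claim_equal_indiceOccurrence : Prop := ∀ (n : Int) (x : Int) (l : List Int), Dom_indiceOccurrence n x l → Pre_indiceOccurrence n x l → Spec_indiceOccurrence n x l (indiceOccurrence n x l)

-- ===== LEMMAS AND PROOFS =====

-- the list of indices ≥ i (in order) at which x occurs in the suffix
def pvPos (x : Int) : Int → List Int → List Int
  | _, [] => []
  | i, a :: t => if a = x then i :: pvPos x (i + 1) t else pvPos x (i + 1) t

theorem pvPos_eq_filter_enumerate (x : Int) (t : List Int) (s : Int) :
    ((PySem.List.enumerate t s).filter (fun p => p.2 == x)).map Prod.fst = pvPos x s t := by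
  induction t generalizing s with
  | nil => simp [PySem.List.enumerate_nil, pvPos]
  | cons a t ih =>
    simp only [PySem.List.enumerate_cons, List.filter_cons, pvPos]
    by_cases h : a = x
    · simp [h, ih]
    · simp [h, Ne.symm h, ih]

theorem pvLoopA_three (x : Int) (l : List Int) (t : List Int) (i : Int) (res : Int) :
    pvLoopA x l t i 3 res = res := by
  cases t <;> simp [pvLoopA]

theorem pvLoopA_spec (x : Int) (l : List Int) (t : List Int) (i : Int) (j : Nat) (res : Int)
    (hj : j < 3) :
    pvLoopA x l t i j res =
      match (pvPos x i t)[2 - j]? with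
      | some p => (PySem.List.pyGet? l (p + 1)).getD 0
      | none => res := by
  induction t generalizing i j res with
  | nil => simp [pvLoopA, pvPos]
  | cons a t ih =>
    by_cases h : a = x
    · simp only [pvLoopA, if_pos hj, if_pos h, pvPos, if_pos h]
      by_cases hj2 : j = 2
      · subst hj2
        simp [pvLoopA_three]
      · have hj' : j + 1 < 3 := by omega
        rw [ih (i + 1) (j + 1) _ hj']
        have hne : j + 1 ≠ 3 := by omega
        have hidx : 2 - j = (2 - (j + 1)) + 1 := by omega
        simp [hne, hidx]
    · simp only [pvLoopA, if_pos hj, if_neg h, pvPos, if_neg h]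
      exact ih (i + 1) j res hj

-- ===== VERDICT (by name: the statement is the Claim_ definition above) =====
theorem indiceOccurrence_spec : Claim_equal_indiceOccurrence := by
  intro n x l _ _
  unfold Spec_indiceOccurrence indiceOccurrence indiceOccurrence_alt
  rw [pvLoopA_spec x l l 0 0 (-1) (by omega), pvPos_eq_filter_enumerate]
  set P := pvPos x 0 l with hP
  by_cases hlen : 3 ≤ P.length
  · have h2 : 2 < P.length := by omega
    have : P[2]? = some P[2] := List.getElem?_eq_getElem h2
    have hpy : PySem.List.pyGet? P 2 = P[2]? := by
      have := PySem.List.pyGet?_natCast P 2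
      simpa using this
    simp [hlen, this, hpy]
  · have h2 : P.length ≤ 2 := by omega
    have : P[2]? = none := List.getElem?_eq_none h2
    simp [hlen, this]
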